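-- pv_equiv track=rewrite | github.com/wuchen0901/algorithm | knapsack/counting.py | count_ordered_sums_unbounded
-- ===== SOURCE A (Python) =====
-- from collections import Counter, defaultdict
-- from typing import Dict, List
--
-- def count_ordered_sums_unbounded(nums: List[int], target: int) -> int:
--     """Unbounded permutations counted by sequence length progression."""
--     if not nums:
--         return 0
--     filtered = [n for n in nums if n > 0 and n <= target]
--     if not filtered:
--         return 0
--     max_len = target // min(filtered)
--     curr = Counter({0: 1})
--     cumulative = Counter(curr)
--     for _ in range(1, max_len + 1):
--         next_counter = Counter()
--         for total, ways in curr.items():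
--             for n in filtered:
--                 next_counter[total + n] += ways
--         cumulative += next_counter
--         curr = next_counter
--         if not curr:
--             break
--     return cumulative[target]
-- ===== SOURCE B (Python) =====
-- def count_ordered_sums_unbounded(nums, target):
--     """Unbounded permutations counted by 1D DP over totals."""
--     coins = [n for n in nums if 0 < n <= target]
--     if not coins:
--         return 0
--     ways = [0] * (target + 1)
--     ways[0] = 1
--     for t in range(1, target + 1):
--         ways[t] = sum(ways[t - n] for n in coins if n <= t)
--     return ways[target]
-- ===== Notes on version B (the rewrite author's own statement) =====
-- stated objective: faster
-- what changed: Replaced the length-indexed Counter BFS (one Counter per sequence length, accumulated) by a single 1D DP array over totals with ways[t] = sum of ways[t-n].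
import Mathlib
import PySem

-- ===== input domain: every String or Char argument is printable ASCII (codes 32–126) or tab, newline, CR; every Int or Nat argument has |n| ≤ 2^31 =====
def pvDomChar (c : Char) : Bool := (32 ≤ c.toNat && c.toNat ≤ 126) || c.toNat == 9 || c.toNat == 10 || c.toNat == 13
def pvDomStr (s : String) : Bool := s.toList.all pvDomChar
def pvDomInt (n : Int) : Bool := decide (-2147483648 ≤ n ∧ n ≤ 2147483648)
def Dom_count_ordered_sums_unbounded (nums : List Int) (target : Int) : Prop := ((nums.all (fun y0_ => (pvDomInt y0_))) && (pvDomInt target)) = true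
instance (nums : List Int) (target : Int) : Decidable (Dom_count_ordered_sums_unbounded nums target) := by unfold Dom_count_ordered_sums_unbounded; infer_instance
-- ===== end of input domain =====

-- B replaces A's length-by-length Counter BFS with a single 1D DP array over totals (asymptotically faster).

-- ===== PORT A =====
-- `counter[key] += v` on a Counter (a missing key reads as 0)
def pvBump (d : PySem.Dict Int Int) (k v : Int) : PySem.Dict Int Int :=
  d.insert k (d.getD k 0 + v)

-- `for total, ways in curr.items(): for n in filtered: next_counter[total + n] += ways`
def pvStepA (filtered : List Int) (curr : PySem.Dict Int Int) : PySem.Dict Int Int :=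
  curr.items.foldl
    (fun acc tw => filtered.foldl (fun a n => pvBump a (tw.1 + n) tw.2) acc)
    PySem.Dict.empty

-- Counter._keep_positive: delete the non-positive entries; the surviving items keep their
-- order, i.e. the items list is filtered in place.
def pvKeepPositive (d : PySem.Dict Int Int) : PySem.Dict Int Int :=
  PySem.Dict.mk (d.items.filter (fun p => decide (0 < p.2)))

-- `cumulative += next_counter` = Counter.__iadd__: self[elem] += count for each item of
-- other, then _keep_positive
def pvCtrIAdd (c1 c2 : PySem.Dict Int Int) : PySem.Dict Int Int :=
  pvKeepPositive (c2.items.foldl (fun r tw => pvBump r tw.1 tw.2) c1)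

-- `for _ in range(1, max_len + 1): …` with the `if not curr: break` at the end of the body;
-- the fuel is the number of iterations range(1, max_len + 1) performs, max(0, max_len);
-- `next_counter` of the body appears twice instead of being let-bound (same value)
def pvLoopA (filtered : List Int) : Nat → PySem.Dict Int Int → PySem.Dict Int Int → PySem.Dict Int Int
  | 0, _, cum => cum
  | k + 1, curr, cum =>
    if (pvStepA filtered curr).items = [] then pvCtrIAdd cum (pvStepA filtered curr)
    else pvLoopA filtered k (pvStepA filtered curr) (pvCtrIAdd cum (pvStepA filtered curr))

def count_ordered_sums_unbounded (nums : List Int) (target : Int) : Int :=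
  if nums = [] then 0
  else
    let filtered := nums.filter (fun n => decide (0 < n) && decide (n ≤ target))
    if filtered = [] then 0
    else
      -- min(filtered): filtered ≠ [] here, so min? is some and the getD default is never used
      let maxLen := PySem.Int.floordiv target ((PySem.List.min? filtered id).getD 0)
      -- curr = Counter({0: 1}); cumulative = Counter(curr) is the same one-item counter
      let curr := PySem.Dict.empty.insert (0 : Int) (1 : Int)
      (pvLoopA filtered maxLen.toNat curr curr).getD target 0

-- ===== PORT B =====
-- loop body: `ways[t] = sum(ways[t-n] for n in coins if n <= t)`; in B every index t and t-n
-- is in range (1 ≤ t ≤ target, 1 ≤ n ≤ t), so the total forms pySetD/pyGetD are exact here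
def pvStepB (coins : List Int) (ways : List Int) (t : Int) : List Int :=
  PySem.List.pySetD ways t
    (((coins.filter (fun n => decide (n ≤ t))).map
        (fun n => PySem.List.pyGetD ways (t - n) 0)).sum)

def count_ordered_sums_unbounded_alt (nums : List Int) (target : Int) : Int :=
  let coins := nums.filter (fun n => decide (0 < n) && decide (n ≤ target))
  if coins = [] then 0
  else
    -- ways = [0] * (target + 1); ways[0] = 1  (coins ≠ [] forces target ≥ 1, so index 0 exists)
    let ways0 := (List.replicate (target + 1).toNat (0 : Int)).set 0 1
    let ways := (PySem.List.pyRange 1 (target + 1) 1).foldl (pvStepB coins) ways0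
    PySem.List.pyGetD ways target 0

-- ===== PRECONDITION & SPEC =====
def Spec_count_ordered_sums_unbounded (nums : List Int) (target : Int) (out : Int) : Prop := out = count_ordered_sums_unbounded_alt nums target
instance (nums : List Int) (target : Int) (out : Int) : Decidable (Spec_count_ordered_sums_unbounded nums target out) := by unfold Spec_count_ordered_sums_unbounded; infer_instance

-- ===== CLAIM (what is proved, stated in full; the proofs are below) =====
def Claim_equal_count_ordered_sums_unbounded : Prop := ∀ (nums : List Int) (target : Int), Dom_count_ordered_sums_unbounded nums target → Spec_count_ordered_sums_unbounded nums target (count_ordered_sums_unbounded nums target)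

-- ===== LEMMAS AND PROOFS =====

-- number of length-k sequences of elements of `coins` summing to t
def pvG (coins : List Int) : Nat → Int → Int
  | 0, t => if t = 0 then 1 else 0
  | k + 1, t => (coins.map (fun n => pvG coins k (t - n))).sum

-- partial cumulative count: sequences of length < N summing to t
def pvS (coins : List Int) (t : Int) (N : Nat) : Int :=
  ((List.range N).map (fun j => pvG coins j t)).sum

-- total count of sequences summing to t (all lengths; lengths > t.toNat contribute 0)
def pvW (coins : List Int) (t : Int) : Int := pvS coins t (t.toNat + 1)

lemma pvG_nonneg (coins : List Int) (k : Nat) (t : Int) : 0 ≤ pvG coins k t := by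
  induction k generalizing t with
  | zero => simp only [pvG]; split <;> norm_num
  | succ k ih =>
    simp only [pvG]
    apply List.sum_nonneg
    intro x hx
    obtain ⟨n, _, rfl⟩ := List.mem_map.1 hx
    exact ih _

lemma pvG_zero (coins : List Int) (m : Int) (hm : ∀ n ∈ coins, m ≤ n) :
    ∀ (k : Nat) (t : Int), t < k * m → pvG coins k t = 0 := by
  intro k
  induction k with
  | zero =>
    intro t ht
    norm_num at ht
    simp only [pvG]
    rw [if_neg (by omega)]
  | succ k ih =>
    intro t ht
    simp only [pvG]
    apply List.sum_eq_zero
    intro x hx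
    obtain ⟨n, hn, rfl⟩ := List.mem_map.1 hx
    apply ih
    have hmn := hm n hn
    push_cast at ht ⊢
    nlinarith

lemma pvG_zero_succ (coins : List Int) (k : Nat) (h : ∀ t, pvG coins k t = 0) :
    ∀ t, pvG coins (k + 1) t = 0 := by
  intro t
  simp only [pvG]
  apply List.sum_eq_zero
  intro x hx
  obtain ⟨n, _, rfl⟩ := List.mem_map.1 hx
  exact h _

lemma pvG_zero_ge (coins : List Int) (k : Nat) (h : ∀ t, pvG coins k t = 0) :
    ∀ (j : Nat), k ≤ j → ∀ t, pvG coins j t = 0 := by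
  intro j hj
  induction j, hj using Nat.le_induction with
  | base => exact h
  | succ j _ ih => exact pvG_zero_succ coins j ih

lemma pvS_succ (coins : List Int) (t : Int) (N : Nat) :
    pvS coins t (N + 1) = pvS coins t N + pvG coins N t := by
  simp [pvS, List.range_succ]

lemma pvS_stable (coins : List Int) (t : Int) (N : Nat)
    (hz : ∀ j : Nat, N ≤ j → pvG coins j t = 0) :
    ∀ M : Nat, N ≤ M → pvS coins t M = pvS coins t N := by
  intro M hM
  induction M, hM using Nat.le_induction with
  | base => rfl
  | succ M hM ih => rw [pvS_succ, ih, hz M hM, add_zero]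

lemma pvW_eq_pvS (coins : List Int) (h1 : ∀ n ∈ coins, 1 ≤ n) (t : Int) (M : Nat)
    (hM : t.toNat + 1 ≤ M) : pvS coins t M = pvW coins t := by
  unfold pvW
  exact pvS_stable coins t (t.toNat + 1)
    (fun j hj => pvG_zero coins 1 h1 j t (by rw [mul_one]; omega)) M hM

-- swap a double list sum
lemma pv_sum_swap {α β : Type} (l1 : List α) (l2 : List β) (h : α → β → Int) :
    (l1.map (fun a => (l2.map (h a)).sum)).sum
      = (l2.map (fun b => (l1.map (fun a => h a b)).sum)).sum := by
  induction l1 with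
  | nil => simp
  | cons a l ih =>
    simp only [List.map_cons, List.sum_cons, ih, PySem.List.sum_map_add_int]

-- a sum of (if p then f else 0) is the sum of f over the filtered list
lemma pv_sum_ite {α : Type} (l : List α) (p : α → Bool) (f : α → Int) :
    (l.map (fun n => if p n = true then f n else 0)).sum = ((l.filter p).map f).sum := by
  induction l with
  | nil => simp
  | cons a l ih => by_cases h : p a <;> simp [h, ih]

lemma pvW_zero (coins : List Int) : pvW coins 0 = 1 := by
  norm_num [pvW, pvS, List.range_one, pvG]

lemma pvW_rec (coins : List Int) (h1 : ∀ n ∈ coins, 1 ≤ n) (t : Int) (ht : 1 ≤ t) :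
    pvW coins t
      = ((coins.filter (fun n => decide (n ≤ t))).map (fun n => pvW coins (t - n))).sum := by
  unfold pvW
  have h0 : pvS coins t (t.toNat + 1)
      = pvG coins 0 t + ((List.range t.toNat).map (fun j => pvG coins (j + 1) t)).sum := by
    simp only [pvS, List.range_succ_eq_map, List.map_cons, List.sum_cons, List.map_map]
    exact congrArg (fun l => pvG coins 0 t + List.sum l) (List.map_congr_left fun j _ => rfl)
  rw [h0]
  have hg0 : pvG coins 0 t = 0 := by simp only [pvG]; rw [if_neg (by omega)]
  rw [hg0, zero_add]
  have h1' : ((List.range t.toNat).map (fun j => pvG coins (j + 1) t)).sum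
      = (coins.map (fun n => ((List.range t.toNat).map (fun j => pvG coins j (t - n))).sum)).sum := by
    have hs := pv_sum_swap (List.range t.toNat) coins (fun j n => pvG coins j (t - n))
    simpa only [pvG] using hs
  rw [h1']
  have h2 : ∀ n ∈ coins, ((List.range t.toNat).map (fun j => pvG coins j (t - n))).sum
      = if decide (n ≤ t) = true then pvW coins (t - n) else 0 := by
    intro n hn
    by_cases hle : n ≤ t
    · rw [if_pos (by simpa using hle)]
      exact pvW_eq_pvS coins h1 (t - n) t.toNat (by have := h1 n hn; omega)
    · rw [if_neg (by simpa using hle)]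
      apply List.sum_eq_zero
      intro x hx
      obtain ⟨j, _, rfl⟩ := List.mem_map.1 hx
      exact pvG_zero coins 1 h1 j (t - n) (by rw [mul_one]; omega)
  rw [List.map_congr_left h2, pv_sum_ite]
  rfl

-- ---- the Counter invariant for the A side ----

-- d is a Counter representing the count function f: nodup keys, getD reads f, keys = support
def pvGoodC (d : PySem.Dict Int Int) (f : Int → Int) : Prop :=
  d.keys.Nodup ∧ (∀ t, d.getD t 0 = f t) ∧ (∀ t, t ∈ d.keys ↔ 0 < f t)

lemma pvGoodC_congr {d : PySem.Dict Int Int} {f g : Int → Int} (h : pvGoodC d f)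
    (hfg : ∀ t, f t = g t) : pvGoodC d g := by
  refine ⟨h.1, fun t => ?_, fun t => ?_⟩
  · rw [h.2.1 t, hfg t]
  · rw [h.2.2 t, hfg t]

lemma pvGoodC_nonneg {d : PySem.Dict Int Int} {f : Int → Int} (h : pvGoodC d f) (t : Int) :
    0 ≤ f t := by
  by_cases hmem : t ∈ d.keys
  · exact le_of_lt ((h.2.2 t).1 hmem)
  · have hc : d.contains t = false := by
      cases hcc : d.contains t
      · rfl
      · exact absurd ((PySem.Dict.contains_iff_mem_keys d t).1 hcc) hmem
    rw [← h.2.1 t, PySem.Dict.getD_of_not_contains d 0 hc]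

-- for a nodup association list, the sum of the values at key t is the dict lookup
lemma pv_items_sum_getD (l : List (Int × Int)) (hnd : (l.map Prod.fst).Nodup) (t : Int) :
    ((l.filter (fun p => decide (p.1 = t))).map Prod.snd).sum = (PySem.Dict.mk l).getD t 0 := by
  induction l with
  | nil => rfl
  | cons p l ih =>
    obtain ⟨k, v⟩ := p
    simp only [List.map_cons, List.nodup_cons] at hnd
    obtain ⟨hk, hnd⟩ := hnd
    rw [List.filter_cons]
    by_cases hkt : k = t
    · subst hkt
      have hrest : l.filter (fun p => decide (p.1 = k)) = [] := by
        rw [List.filter_eq_nil_iff]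
        intro a ha
        simp only [decide_eq_true_eq]
        intro hak
        exact hk (hak ▸ List.mem_map_of_mem ha)
      simp [hrest, PySem.Dict.getD_eq_get?_getD, PySem.Dict.get?_mk_cons]
    · rw [if_neg (by simpa using hkt)]
      rw [ih hnd]
      simp [PySem.Dict.getD_eq_get?_getD, PySem.Dict.get?_mk_cons,
        show (k == t) = false by simpa using hkt]

lemma pvBumpFold_getD (ps : List (Int × Int)) :
    ∀ (d : PySem.Dict Int Int) (t : Int),
      ((ps.foldl (fun a p => pvBump a p.1 p.2) d).getD t 0)
        = d.getD t 0 + ((ps.filter (fun p => decide (p.1 = t))).map Prod.snd).sum := by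
  induction ps with
  | nil => intro d t; simp
  | cons p ps ih =>
    intro d t
    rw [List.foldl_cons, ih, List.filter_cons]
    by_cases h : p.1 = t
    · rw [if_pos (by simpa using h)]
      simp only [pvBump, PySem.Dict.getD_insert, if_pos h.symm, List.map_cons, List.sum_cons]
      rw [h]
      ring
    · rw [if_neg (by simpa using h)]
      simp only [pvBump, PySem.Dict.getD_insert]
      rw [if_neg (by omega)]

lemma pvBumpFold_keys (ps : List (Int × Int)) :
    ∀ (d : PySem.Dict Int Int) (t : Int),
      (t ∈ (ps.foldl (fun a p => pvBump a p.1 p.2) d).keys ↔ t ∈ d.keys ∨ ∃ p ∈ ps, p.1 = t) := by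
  induction ps with
  | nil => intro d t; simp
  | cons p ps ih =>
    intro d t
    rw [List.foldl_cons, ih]
    simp only [pvBump, PySem.Dict.mem_keys_insert, List.mem_cons]
    constructor
    · rintro (⟨h | h⟩ | ⟨q, hq, hqt⟩)
      · exact Or.inr ⟨p, Or.inl rfl, h.symm⟩
      · exact Or.inl h
      · exact Or.inr ⟨q, Or.inr hq, hqt⟩
    · rintro (h | ⟨q, hq | hq, hqt⟩)
      · exact Or.inl (Or.inr h)
      · exact Or.inl (Or.inl (hq ▸ hqt.symm))
      · exact Or.inr ⟨q, hq, hqt⟩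

lemma pvBumpFold_nodup (ps : List (Int × Int)) :
    ∀ (d : PySem.Dict Int Int), d.keys.Nodup →
      (ps.foldl (fun a p => pvBump a p.1 p.2) d).keys.Nodup := by
  induction ps with
  | nil => intro d hd; exact hd
  | cons p ps ih =>
    intro d hd
    rw [List.foldl_cons]
    exact ih _ (PySem.Dict.nodup_keys_insert d p.1 _ hd)

lemma pv_sum_map_flatMap {α β : Type} (l : List α) (g : α → List β) (f : β → Int) :
    ((l.flatMap g).map f).sum = (l.map (fun x => ((g x).map f).sum)).sum := by
  induction l with
  | nil => simp
  | cons a l ih => simp [List.flatMap_cons, ih]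

lemma pv_ite_shift (a b c v : Int) :
    (if a + b = c then v else (0 : Int)) = if a = c - b then v else 0 := by
  split_ifs <;> omega

lemma pvStepA_good (coins : List Int) (curr : PySem.Dict Int Int) (f : Int → Int)
    (h : pvGoodC curr f) :
    pvGoodC (pvStepA coins curr) (fun t => (coins.map (fun n => f (t - n))).sum) := by
  obtain ⟨hnd, hget, hmem⟩ := h
  have hnn : ∀ t, 0 ≤ f t := pvGoodC_nonneg ⟨hnd, hget, hmem⟩
  have hndi : (curr.items.map Prod.fst).Nodup := hnd
  have hfold : pvStepA coins curr
      = (curr.items.flatMap (fun tw => coins.map (fun n => (tw.1 + n, tw.2)))).foldl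
          (fun a p => pvBump a p.1 p.2) PySem.Dict.empty := by
    unfold pvStepA
    rw [List.foldl_flatMap]
    simp only [List.foldl_map]
  refine ⟨?_, ?_, ?_⟩
  · rw [hfold]
    exact pvBumpFold_nodup _ _ PySem.Dict.nodup_keys_empty
  · intro t
    show _ = (coins.map (fun n => f (t - n))).sum
    rw [hfold, pvBumpFold_getD, PySem.Dict.getD_empty, zero_add]
    rw [List.filter_flatMap, pv_sum_map_flatMap]
    have hinner : ∀ tw ∈ curr.items,
        (((coins.map (fun n => (tw.1 + n, tw.2))).filter (fun p => decide (p.1 = t))).map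
            Prod.snd).sum
          = (coins.map (fun n => if decide (tw.1 = t - n) = true then tw.2 else 0)).sum := by
      intro tw _
      rw [List.filter_map, List.map_map]
      rw [← pv_sum_ite]
      apply congrArg
      apply List.map_congr_left
      intro n _
      simp only [Function.comp, decide_eq_true_eq]
      exact pv_ite_shift tw.1 n t tw.2
    rw [List.map_congr_left hinner]
    -- now compute the RHS the same way
    have hrhs : (coins.map (fun n => f (t - n))).sum
        = (curr.items.map (fun tw =>
            (coins.map (fun n => if decide (tw.1 = t - n) = true then tw.2 else 0)).sum)).sum := by
      rw [← pv_sum_swap]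
      apply congrArg
      apply List.map_congr_left
      intro n _
      rw [pv_sum_ite, pv_items_sum_getD curr.items hndi (t - n)]
      exact (hget (t - n)).symm
    rw [hrhs]
  · intro t
    show _ ↔ 0 < (coins.map (fun n => f (t - n))).sum
    rw [hfold, pvBumpFold_keys]
    simp only [PySem.Dict.keys_empty, List.not_mem_nil, false_or]
    constructor
    · rintro ⟨p, hp, hpt⟩
      obtain ⟨tw, htw, hmm2⟩ := List.mem_flatMap.1 hp
      obtain ⟨n, hn, hpn⟩ := List.mem_map.1 hmm2
      subst hpn
      have hkey : tw.1 ∈ curr.keys := PySem.Dict.mem_keys_of_mem_items curr htw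
      have hfp : 0 < f tw.1 := (hmem tw.1).1 hkey
      have hmm : f (t - n) ∈ coins.map (fun n => f (t - n)) := List.mem_map_of_mem hn
      have : t - n = tw.1 := by
        have : tw.1 + n = t := hpt
        omega
      calc (0 : Int) < f (t - n) := by rw [this]; exact hfp
        _ ≤ (coins.map (fun n => f (t - n))).sum :=
          List.single_le_sum (by
            intro y hy
            obtain ⟨n', _, rfl⟩ := List.mem_map.1 hy
            exact hnn _) _ hmm
    · intro hpos
      have hex : ∃ n ∈ coins, 0 < f (t - n) := by
        by_contra hno
        rw [not_exists] at hno
        simp only [not_and, not_lt] at hno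
        have : (coins.map (fun n => f (t - n))).sum = 0 := by
          apply List.sum_eq_zero
          intro x hx
          obtain ⟨n, hn, rfl⟩ := List.mem_map.1 hx
          have := hno n hn
          have := hnn (t - n)
          omega
        omega
      obtain ⟨n, hn, hfn⟩ := hex
      have hkey : t - n ∈ curr.keys := (hmem (t - n)).2 hfn
      have : ∃ tw ∈ curr.items, tw.1 = t - n := by
        simp only [PySem.Dict.keys] at hkey
        obtain ⟨tw, htw, h'⟩ := List.mem_map.1 hkey
        exact ⟨tw, htw, h'⟩
      obtain ⟨tw, htw, htw1⟩ := this
      refine ⟨(tw.1 + n, tw.2), ?_, by show tw.1 + n = t; omega⟩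
      exact List.mem_flatMap.2 ⟨tw, htw, List.mem_map.2 ⟨n, hn, rfl⟩⟩

lemma pvKeepPositive_id (d : PySem.Dict Int Int) (h : ∀ p ∈ d.items, 0 < p.2) :
    pvKeepPositive d = d := by
  unfold pvKeepPositive
  rw [List.filter_eq_self.2 (fun p hp => by simpa using h p hp)]

lemma pvCtrIAdd_good {c1 c2 : PySem.Dict Int Int} {f1 f2 : Int → Int}
    (h1 : pvGoodC c1 f1) (h2 : pvGoodC c2 f2) :
    pvGoodC (pvCtrIAdd c1 c2) (fun t => f1 t + f2 t) := by
  obtain ⟨hnd1, hget1, hmem1⟩ := h1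
  obtain ⟨hnd2, hget2, hmem2⟩ := h2
  have hnn1 := pvGoodC_nonneg ⟨hnd1, hget1, hmem1⟩
  have hnn2 := pvGoodC_nonneg ⟨hnd2, hget2, hmem2⟩
  have hndi2 : (c2.items.map Prod.fst).Nodup := hnd2
  have hgetr : ∀ t,
      (c2.items.foldl (fun r tw => pvBump r tw.1 tw.2) c1).getD t 0 = f1 t + f2 t := by
    intro t
    rw [pvBumpFold_getD, hget1, pv_items_sum_getD c2.items hndi2 t]
    have : (PySem.Dict.mk c2.items) = c2 := rfl
    rw [this, hget2]
  have hndr : (c2.items.foldl (fun r tw => pvBump r tw.1 tw.2) c1).keys.Nodup :=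
    pvBumpFold_nodup _ _ hnd1
  have hmemr : ∀ t,
      t ∈ (c2.items.foldl (fun r tw => pvBump r tw.1 tw.2) c1).keys ↔ 0 < f1 t + f2 t := by
    intro t
    rw [pvBumpFold_keys]
    have hiff2 : (∃ p ∈ c2.items, p.1 = t) ↔ t ∈ c2.keys := by
      simp only [PySem.Dict.keys, List.mem_map]
    rw [hiff2, hmem1, hmem2]
    have := hnn1 t
    have := hnn2 t
    constructor
    · rintro (h | h) <;> omega
    · intro h; omega
  have hpos : ∀ p ∈ (c2.items.foldl (fun r tw => pvBump r tw.1 tw.2) c1).items, 0 < p.2 := by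
    intro p hp
    obtain ⟨k, v⟩ := p
    have hv := PySem.Dict.getD_of_mem_items _ hp hndr 0
    have hk : k ∈ (c2.items.foldl (fun r tw => pvBump r tw.1 tw.2) c1).keys :=
      PySem.Dict.mem_keys_of_mem_items _ hp
    have := (hmemr k).1 hk
    have := hgetr k
    simp only at hv ⊢
    omega
  unfold pvCtrIAdd
  rw [pvKeepPositive_id _ hpos]
  exact ⟨hndr, hgetr, hmemr⟩

lemma pvLoopA_getD (coins : List Int) :
    ∀ (k K : Nat) (curr cum : PySem.Dict Int Int),
      pvGoodC curr (pvG coins K) → pvGoodC cum (fun t => pvS coins t (K + 1)) →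
      ∀ t, (pvLoopA coins k curr cum).getD t 0 = pvS coins t (K + 1 + k) := by
  intro k
  induction k with
  | zero =>
    intro K curr cum _ hcum t
    exact hcum.2.1 t
  | succ k ih =>
    intro K curr cum hc hcum t
    have hnextgood : pvGoodC (pvStepA coins curr) (pvG coins (K + 1)) := by
      have hg := pvStepA_good coins curr (pvG coins K) hc
      exact pvGoodC_congr hg (fun t => by simp only [pvG])
    have hcum' : pvGoodC (pvCtrIAdd cum (pvStepA coins curr))
        (fun t => pvS coins t (K + 1 + 1)) := by
      have hg := pvCtrIAdd_good hcum hnextgood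
      exact pvGoodC_congr hg (fun t => (pvS_succ coins t (K + 1)).symm)
    by_cases hb : (pvStepA coins curr).items = []
    · rw [pvLoopA, if_pos hb]
      have hzero : ∀ s, pvG coins (K + 1) s = 0 := by
        intro s
        have hkeys : (pvStepA coins curr).keys = [] := by
          simp only [PySem.Dict.keys, hb, List.map_nil]
        have hnot : ¬ 0 < pvG coins (K + 1) s := by
          rw [← hnextgood.2.2 s, hkeys]
          simp
        have := pvG_nonneg coins (K + 1) s
        omega
      have hc2 : (pvCtrIAdd cum (pvStepA coins curr)).getD t 0 = pvS coins t (K + 1 + 1) :=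
        hcum'.2.1 t
      rw [hc2]
      exact (pvS_stable coins t (K + 1 + 1)
        (fun j hj => pvG_zero_ge coins (K + 1) hzero j (by omega) t)
        (K + 1 + (k + 1)) (by omega)).symm
    · rw [pvLoopA, if_neg hb]
      have := ih (K + 1) (pvStepA coins curr) (pvCtrIAdd cum (pvStepA coins curr))
        hnextgood hcum' t
      rw [this]
      congr 1
      omega

-- ---- the DP invariant for the B side ----

lemma pvB_loop (coins : List Int) (target : Int) (h1 : ∀ n ∈ coins, 1 ≤ n) :
    ∀ (fuel : Nat) (a : Int) (ways : List Int), 1 ≤ a → (target + 1 - a).toNat = fuel →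
      ways.length = (target + 1).toNat →
      (∀ i : Nat, (hi : i < ways.length) → ways[i] = if (i : Int) < a then pvW coins i else 0) →
      ((PySem.List.pyRange a (target + 1) 1).foldl (pvStepB coins) ways).length
          = (target + 1).toNat ∧
      (∀ i : Nat,
        (hi : i < ((PySem.List.pyRange a (target + 1) 1).foldl (pvStepB coins) ways).length) →
        ((PySem.List.pyRange a (target + 1) 1).foldl (pvStepB coins) ways)[i]
          = if (i : Int) < target + 1 then pvW coins i else 0) := by
  intro fuel
  induction fuel with
  | zero =>
    intro a ways ha hfa hlen hinv
    have hba : target + 1 ≤ a := by omega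
    have hnil : PySem.List.pyRange a (target + 1) 1 = [] := by
      simp [PySem.List.pyRange]
      omega
    rw [hnil]
    simp only [List.foldl_nil]
    refine ⟨hlen, fun i hi => ?_⟩
    rw [hinv i hi, if_pos (by omega), if_pos (by omega)]
  | succ fuel ih =>
    intro a ways ha hfa hlen hinv
    have hab : a < target + 1 := by omega
    rw [PySem.List.pyRange_one_cons hab, List.foldl_cons]
    have hstep : pvStepB coins ways a = ways.set a.toNat (pvW coins a) := by
      unfold pvStepB
      rw [PySem.List.pySetD_of_nonneg _ _ (by omega)]
      congr 1
      rw [pvW_rec coins h1 a ha]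
      have hreads : ∀ n ∈ coins.filter (fun n => decide (n ≤ a)),
          PySem.List.pyGetD ways (a - n) 0 = pvW coins (a - n) := by
        intro n hn
        have hn' := List.mem_filter.1 hn
        have h1n : 1 ≤ n := h1 n hn'.1
        have hna : n ≤ a := by simpa using hn'.2
        rw [PySem.List.pyGetD_eq_getElem ways 0 (by omega) (by rw [hlen]; omega)]
        rw [hinv (a - n).toNat (by omega), if_pos (by omega)]
        congr 1
        omega
      exact congrArg List.sum (List.map_congr_left hreads)
    rw [hstep]
    exact ih (a + 1) _ (by omega) (by omega) (by rw [List.length_set]; exact hlen)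
      (by
        intro i hi
        rw [List.length_set] at hi
        rw [List.getElem_set]
        by_cases hia : a.toNat = i
        · rw [if_pos hia, if_pos (by omega)]
          congr 1
          omega
        · rw [if_neg hia, hinv i hi]
          by_cases hlt : (i : Int) < a
          · rw [if_pos hlt, if_pos (by omega)]
          · rw [if_neg hlt, if_neg (by omega)])

-- min of a nonempty list is some
lemma pv_min?_isSome : ∀ (xs : List Int) (x : Int), ∃ m, PySem.List.min? (x :: xs) id = some m := by
  intro xs
  induction xs with
  | nil => intro x; exact ⟨x, rfl⟩
  | cons y ys ih =>
    intro x
    by_cases hy : y < x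
    · obtain ⟨m, hm⟩ := ih y
      refine ⟨m, ?_⟩
      simp only [PySem.List.min?] at hm ⊢
      simpa [hy] using hm
    · obtain ⟨m, hm⟩ := ih x
      refine ⟨m, ?_⟩
      simp only [PySem.List.min?] at hm ⊢
      simpa [hy] using hm

lemma pvA_value (nums : List Int) (target : Int) (hnil : nums ≠ [])
    (hce : nums.filter (fun n => decide (0 < n) && decide (n ≤ target)) ≠ []) :
    count_ordered_sums_unbounded nums target
      = pvW (nums.filter (fun n => decide (0 < n) && decide (n ≤ target))) target := by
  set coins := nums.filter (fun n => decide (0 < n) && decide (n ≤ target)) with hc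
  have hcm : ∀ n ∈ coins, 1 ≤ n ∧ n ≤ target := by
    intro n hn
    rw [hc] at hn
    have := List.mem_filter.1 hn
    simp only [Bool.and_eq_true, decide_eq_true_eq] at this
    omega
  have h1 : ∀ n ∈ coins, 1 ≤ n := fun n hn => (hcm n hn).1
  have htg : 1 ≤ target := by
    obtain ⟨n, hn⟩ := List.exists_mem_of_ne_nil coins hce
    have := hcm n hn
    omega
  obtain ⟨x, xs, hxxs⟩ : ∃ x xs, coins = x :: xs := by
    cases hcc : coins with
    | nil => exact absurd hcc hce
    | cons x xs => exact ⟨x, xs, rfl⟩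
  obtain ⟨m, hm⟩ := pv_min?_isSome xs x
  rw [← hxxs] at hm
  have hmmem : m ∈ coins := PySem.List.min?_mem hm
  have hmmin : ∀ n ∈ coins, m ≤ n := fun n hn => by simpa using PySem.List.min?_isMin hm n hn
  have hm1 : 1 ≤ m := h1 m hmmem
  have hL0 : 0 ≤ PySem.Int.floordiv target m :=
    (PySem.Int.le_floordiv_iff_mul_le (by omega)).2 (by omega)
  have hLlt : target < (PySem.Int.floordiv target m + 1) * m :=
    (PySem.Int.floordiv_lt_iff_lt_mul (by omega)).1 (by omega)
  have good0 : pvGoodC (PySem.Dict.empty.insert (0 : Int) (1 : Int)) (pvG coins 0) := by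
    have hkeys : (PySem.Dict.empty.insert (0 : Int) (1 : Int)).keys = [0] := by decide
    refine ⟨by rw [hkeys]; simp, fun t => ?_, fun t => ?_⟩
    · rw [PySem.Dict.getD_insert, PySem.Dict.getD_empty]
      simp only [pvG]
    · rw [hkeys]
      simp only [List.mem_singleton, pvG]
      constructor
      · intro h; rw [if_pos h]; norm_num
      · intro h; by_contra hne; rw [if_neg hne] at h; omega
  have goodc0 : pvGoodC (PySem.Dict.empty.insert (0 : Int) (1 : Int))
      (fun t => pvS coins t (0 + 1)) :=
    pvGoodC_congr good0 (fun t => by simp [pvS, List.range_one])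
  have hA := pvLoopA_getD coins (PySem.Int.floordiv target m).toNat 0 _ _ good0 goodc0 target
  have hzero : ∀ j : Nat, (PySem.Int.floordiv target m).toNat + 1 ≤ j →
      pvG coins j target = 0 := by
    intro j hj
    apply pvG_zero coins m hmmin j target
    have hjL : PySem.Int.floordiv target m + 1 ≤ (j : Int) := by omega
    nlinarith
  have hAW : pvS coins target (0 + 1 + (PySem.Int.floordiv target m).toNat)
      = pvW coins target := by
    have e1 := pvS_stable coins target ((PySem.Int.floordiv target m).toNat + 1) hzero
      (max ((PySem.Int.floordiv target m).toNat + 1) (target.toNat + 1)) (le_max_left _ _)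
    have e2 := pvW_eq_pvS coins h1 target
      (max ((PySem.Int.floordiv target m).toNat + 1) (target.toNat + 1)) (le_max_right _ _)
    rw [show 0 + 1 + (PySem.Int.floordiv target m).toNat
        = (PySem.Int.floordiv target m).toNat + 1 by omega]
    omega
  unfold count_ordered_sums_unbounded
  rw [if_neg hnil]
  simp only [← hc]
  rw [if_neg hce, hm]
  simp only [Option.getD_some]
  rw [hA, hAW]

lemma pvB_value (nums : List Int) (target : Int)
    (hce : nums.filter (fun n => decide (0 < n) && decide (n ≤ target)) ≠ []) :
    count_ordered_sums_unbounded_alt nums target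
      = pvW (nums.filter (fun n => decide (0 < n) && decide (n ≤ target))) target := by
  set coins := nums.filter (fun n => decide (0 < n) && decide (n ≤ target)) with hc
  have hcm : ∀ n ∈ coins, 1 ≤ n ∧ n ≤ target := by
    intro n hn
    rw [hc] at hn
    have := List.mem_filter.1 hn
    simp only [Bool.and_eq_true, decide_eq_true_eq] at this
    omega
  have h1 : ∀ n ∈ coins, 1 ≤ n := fun n hn => (hcm n hn).1
  have htg : 1 ≤ target := by
    obtain ⟨n, hn⟩ := List.exists_mem_of_ne_nil coins hce
    have := hcm n hn
    omega
  have hlen0 : ((List.replicate (target + 1).toNat (0 : Int)).set 0 1).length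
      = (target + 1).toNat := by
    rw [List.length_set, List.length_replicate]
  have hinv0 : ∀ i : Nat, (hi : i < ((List.replicate (target + 1).toNat (0 : Int)).set 0 1).length) →
      ((List.replicate (target + 1).toNat (0 : Int)).set 0 1)[i]
        = if (i : Int) < 1 then pvW coins i else 0 := by
    intro i hi
    rw [List.getElem_set]
    by_cases hi0 : 0 = i
    · rw [if_pos hi0, if_pos (by omega)]
      rw [show ((i : Int)) = 0 by omega, pvW_zero]
    · rw [if_neg hi0, List.getElem_replicate, if_neg (by omega)]
  obtain ⟨hlenR, hvalR⟩ := pvB_loop coins target h1 target.toNat 1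
    ((List.replicate (target + 1).toNat (0 : Int)).set 0 1) (by omega) (by omega) hlen0 hinv0
  have hval := hvalR target.toNat (by omega)
  unfold count_ordered_sums_unbounded_alt
  simp only [← hc]
  rw [if_neg hce]
  rw [PySem.List.pyGetD_eq_getElem _ 0 (by omega) (by rw [hlenR]; omega)]
  rw [hval, if_pos (by omega)]
  congr 1
  omega

-- ===== VERDICT (by name: the statement is the Claim_ definition above) =====
theorem count_ordered_sums_unbounded_spec : Claim_equal_count_ordered_sums_unbounded := by
  intro nums target _
  unfold Spec_count_ordered_sums_unbounded
  by_cases hnil : nums = []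
  · subst hnil
    rfl
  by_cases hce : nums.filter (fun n => decide (0 < n) && decide (n ≤ target)) = []
  · unfold count_ordered_sums_unbounded count_ordered_sums_unbounded_alt
    rw [if_neg hnil]
    simp only [hce]
    rfl
  · rw [pvA_value nums target hnil hce, pvB_value nums target hce]
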